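-- pv_equiv track=rewrite | github.com/sss-2002/raman | DTW.py | cosmat
-- ===== SOURCE A (Python) =====
-- def cosmat(a):
--     b = []
--     c = []
--     tmp = []
--     tm = []
--     tmp.append(a[0][0])
--     tm.append(0)
--     for i, j in zip(a[0][1:], tmp):
--         tmp.append(i + j)
--         tm.append(1)
--     b.append(tmp.copy())
--     c.append(tm.copy())
--     for i, j in zip(a[1:], b):
--         tmp = []
--         tm = []
--         tmp.append(i[0] + j[0])
--         tm.append(2)
--         for p, q, r, s in zip(j[:-1], tmp, j[1:], i[1:]):
--             if p <= q and p <= r: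
--                 tmp.append(p + s)
--                 tm.append(0)
--             else:
--                 if q <= r:
--                     tmp.append(q + s)
--                     tm.append(1)
--                 else:
--                     tmp.append(r + s)
--                     tm.append(2)
--         b.append(tmp.copy())
--         c.append(tm.copy())
--     return b, c
-- ===== SOURCE B (Python) =====
-- def cosmat(a):
--     # Pass 1: accumulated-cost matrix b via a plain min-plus recurrence.
--     b = []
--     t = 0
--     row = []
--     for x in a[0]:
--         t += x
--         row.append(t)
--     b.append(row)
--     for cur in a[1:]:
--         prev = b[-1]
--         acc = prev[0] + cur[0]
--         row = [acc]
--         for p, r, s in zip(prev, prev[1:], cur[1:]):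
--             acc = s + min(p, acc, r)
--             row.append(acc)
--         b.append(row)
--     # Pass 2: backtrace matrix c recomputed from the finished b.
--     c = [[0] + [1] * (len(b[0]) - 1)]
--     for prev, row in zip(b, b[1:]):
--         tm = [2]
--         for p, r, q, _ in zip(prev, prev[1:], row, row[1:]):
--             tm.append(0 if p <= q and p <= r else (1 if q <= r else 2))
--         c.append(tm)
--     return b, c
-- ===== Notes on version B (the rewrite author's own statement) =====
-- stated objective: alternative
-- what changed: A builds cost and backtrace rows interleaved via self-extending zips over the growing row; B first builds the accumulated-cost matrix b with a plain min-plus recurrence, then derives the backtrace matrix c in a separate second pass from the finished b.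
import Mathlib
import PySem

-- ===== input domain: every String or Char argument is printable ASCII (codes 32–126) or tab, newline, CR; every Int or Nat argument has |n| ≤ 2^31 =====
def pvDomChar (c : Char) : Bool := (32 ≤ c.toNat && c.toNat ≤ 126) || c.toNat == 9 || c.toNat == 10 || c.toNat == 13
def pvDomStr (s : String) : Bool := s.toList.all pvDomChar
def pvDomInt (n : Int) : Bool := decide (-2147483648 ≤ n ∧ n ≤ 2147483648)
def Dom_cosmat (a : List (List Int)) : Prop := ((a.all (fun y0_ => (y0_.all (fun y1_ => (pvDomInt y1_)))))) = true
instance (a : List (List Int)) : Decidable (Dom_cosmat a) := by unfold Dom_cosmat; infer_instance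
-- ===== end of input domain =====

-- B builds the cost matrix first and derives the backtrace matrix in a second pass;
-- A interleaves both. Equivalence of return values is proved on all nonempty matrices
-- with nonempty rows (exactly where Python A returns without raising IndexError).

-- ===== PORT A =====
-- row-0 loop: 'for i, j in zip(a[0][1:], tmp)' — tmp self-extends, so j is always the
-- last appended value; ported as recursion carrying that value.
def cosmatRow0 (last : Int) : List Int → List Int × List Int
  | [] => ([], [])
  | x :: xs =>
      let v := x + last
      let (t, m) := cosmatRow0 v xs
      (v :: t, 1 :: m)

-- inner loop: 'for p, q, r, s in zip(j[:-1], tmp, j[1:], i[1:])' — q is the last value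
-- appended to tmp; prev row j is consumed as a sliding window p :: r :: _.
def cosmatInner (q : Int) : List Int → List Int → List Int × List Int
  | p :: r :: prest, s :: ss =>
      if p ≤ q ∧ p ≤ r then
        let (t, m) := cosmatInner (p + s) (r :: prest) ss
        ((p + s) :: t, 0 :: m)
      else if q ≤ r then
        let (t, m) := cosmatInner (q + s) (r :: prest) ss
        ((q + s) :: t, 1 :: m)
      else
        let (t, m) := cosmatInner (r + s) (r :: prest) ss
        ((r + s) :: t, 2 :: m)
  | _, _ => ([], [])

-- outer loop: 'for i, j in zip(a[1:], b)' — b self-extends, j is the previous row.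
def cosmatOuter : List (List Int) → List Int → List (List Int) × List (List Int)
  | [], _ => ([], [])
  | i :: rest, j =>
      let h := i.headD 0 + j.headD 0      -- i[0] + j[0] (Pre_ rules out empty rows)
      let (t, m) := cosmatInner h j (i.drop 1)
      let row := h :: t
      let (bs, cs) := cosmatOuter rest row
      (row :: bs, (2 :: m) :: cs)

def cosmat (a : List (List Int)) : List (List Int) × List (List Int) :=
  let a0 := a.headD []                    -- a[0] (Pre_ rules out a = [])
  let first := a0.headD 0                 -- a[0][0]
  let (tmp, tm) := cosmatRow0 first (a0.drop 1)
  let row0 := first :: tmp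
  let (bs, cs) := cosmatOuter (a.drop 1) row0
  (row0 :: bs, (0 :: tm) :: cs)

-- ===== PORT B =====
-- pass 1 row 0: running sum
def altSum (t : Int) : List Int → List Int
  | [] => []
  | x :: xs => (t + x) :: altSum (t + x) xs

-- pass 1 inner: 'for p, r, s in zip(prev, prev[1:], cur[1:])' with acc = row[-1]
def altBInner (acc : Int) : List Int → List Int → List Int
  | p :: r :: prest, s :: ss =>
      let v := s + min p (min acc r)
      v :: altBInner v (r :: prest) ss
  | _, _ => []

-- pass 1 outer: 'for cur in a[1:]'
def altBRows : List (List Int) → List Int → List (List Int)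
  | [], _ => []
  | cur :: rest, prev =>
      let h := prev.headD 0 + cur.headD 0
      let row := h :: altBInner h prev (cur.drop 1)
      row :: altBRows rest row

-- pass 2 inner: 'for p, r, q, _ in zip(prev, prev[1:], row, row[1:])'
def altCInner : List Int → List Int → List Int
  | p :: r :: prest, q :: x :: qrest =>
      (if p ≤ q ∧ p ≤ r then 0 else if q ≤ r then 1 else 2)
        :: altCInner (r :: prest) (x :: qrest)
  | _, _ => []

-- pass 2 outer: 'for prev, row in zip(b, b[1:])'
def altCRows : List (List Int) → List (List Int)
  | prev :: row :: rest => (2 :: altCInner prev row) :: altCRows (row :: rest)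
  | _ => []

def cosmat_alt (a : List (List Int)) : List (List Int) × List (List Int) :=
  let b0 := altSum 0 (a.headD [])
  let b := b0 :: altBRows (a.drop 1) b0
  let c0 := (0 : Int) :: List.replicate (b0.length - 1) 1
  (b, c0 :: altCRows b)

-- ===== PRECONDITION & SPEC =====
-- exactly the inputs on which the Python A returns: a[0][0] and each i[0] must exist
def Pre_cosmat (a : List (List Int)) : Prop := a ≠ [] ∧ ∀ r ∈ a, r ≠ []
instance (a : List (List Int)) : Decidable (Pre_cosmat a) := by unfold Pre_cosmat; infer_instance
def pvWitness_cosmat : List (List Int) := [[1, 2, 3], [4, 0, 5], [2, 2]]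

def Spec_cosmat (a : List (List Int)) (out : List (List Int) × List (List Int)) : Prop := out = cosmat_alt a
instance (a : List (List Int)) (out : List (List Int) × List (List Int)) : Decidable (Spec_cosmat a out) := by unfold Spec_cosmat; infer_instance

-- ===== CLAIM (what is proved, stated in full; the proofs are below) =====
def Claim_equal_cosmat : Prop := ∀ (a : List (List Int)), Dom_cosmat a → Pre_cosmat a → Spec_cosmat a (cosmat a)

-- ===== LEMMAS AND PROOFS =====

theorem cosmatRow0_eq (xs : List Int) : ∀ last, cosmatRow0 last xs = (altSum last xs, List.replicate xs.length 1) := by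
  induction xs with
  | nil => intro last; simp [cosmatRow0, altSum]
  | cons x xs ih =>
      intro last
      simp [cosmatRow0, altSum, ih, Int.add_comm, List.replicate]

theorem altSum_length (xs : List Int) : ∀ t, (altSum t xs).length = xs.length := by
  induction xs with
  | nil => intro t; simp [altSum]
  | cons x xs ih => intro t; simp [altSum, ih]

theorem cosmatInner_eq (ss : List Int) :
    ∀ (prev : List Int) (q : Int),
      cosmatInner q prev ss =
        (altBInner q prev ss, altCInner prev (q :: altBInner q prev ss)) := by
  induction ss with
  | nil =>
      intro prev q
      match prev with
      | [] => simp [cosmatInner, altBInner, altCInner]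
      | [p] => simp [cosmatInner, altBInner, altCInner]
      | p :: r :: prest => simp [cosmatInner, altBInner, altCInner]
  | cons s ss ih =>
      intro prev q
      match prev with
      | [] => simp [cosmatInner, altBInner, altCInner]
      | [p] => simp [cosmatInner, altBInner, altCInner]
      | p :: r :: prest =>
          by_cases h1 : p ≤ q ∧ p ≤ r
          · simp [cosmatInner, altBInner, altCInner, h1, ih, Int.add_comm]
          · by_cases h2 : q ≤ r
            · simp [cosmatInner, altBInner, altCInner, h1, h2, ih, Int.add_comm,
                    show min p q = q by omega]
            · simp [cosmatInner, altBInner, altCInner, h1, h2, ih, Int.add_comm,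
                    show min p (min q r) = r by omega]

theorem cosmatOuter_eq (rest : List (List Int)) :
    ∀ (j : List Int),
      cosmatOuter rest j = (altBRows rest j, altCRows (j :: altBRows rest j)) := by
  induction rest with
  | nil => intro j; simp [cosmatOuter, altBRows, altCRows]
  | cons i rest ih =>
      intro j
      simp [cosmatOuter, altBRows, altCRows, cosmatInner_eq, ih, Int.add_comm]

-- ===== VERDICT (by name: the statement is the Claim_ definition above) =====
theorem cosmat_spec : Claim_equal_cosmat := by
  intro a _ hpre
  obtain ⟨hne, hrows⟩ := hpre
  unfold Spec_cosmat
  match a with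
  | [] => exact absurd rfl hne
  | a0 :: arest =>
      have ha0 : a0 ≠ [] := hrows a0 (List.mem_cons_self ..)
      match a0 with
      | [] => exact absurd rfl ha0
      | x :: xs =>
          simp [cosmat, cosmat_alt, cosmatRow0_eq, cosmatOuter_eq, altSum,
                altSum_length]
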